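-- pv_equiv track=rewrite | github.com/varjmes/compsci | introtopython/quiz/lace_strings.py | laceStrings
-- ===== SOURCE A (Python) =====
-- def laceStrings(s1, s2):
--     '''
--     s1 and s2 are strings.
--
--     Returns a new str with elements of s1 and s2 interlaced,
--     beginning with s1. If strings are not of same length,
--     then the extra elements should appear at the end.
--     '''
--
--     laced = ''
--     start = 0
--     longest = max(len(s1), len(s2))
--     while start <= longest + 1:
--         try:
--             laced += s1[start]
--         except IndexError:
--             pass
--
--         try:
--             laced += s2[start]
--         except IndexError:
--             pass
--
--         start += 1
--
--     return laced
-- ===== SOURCE B (Python) =====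
-- def laceStrings(s1, s2):
--     n = min(len(s1), len(s2))
--     paired = [a + b for a, b in zip(s1, s2)]
--     return ''.join(paired) + s1[n:] + s2[n:]
-- ===== Notes on version B (the rewrite author's own statement) =====
-- stated objective: simpler
-- what changed: Replaces A's exception-guarded while loop that indexes both strings at 0..max(len)+1 and grows the result by repeated string += by a zip over the common prefix joined once, plus a single tail slice of whichever string is longer.
import Mathlib
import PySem

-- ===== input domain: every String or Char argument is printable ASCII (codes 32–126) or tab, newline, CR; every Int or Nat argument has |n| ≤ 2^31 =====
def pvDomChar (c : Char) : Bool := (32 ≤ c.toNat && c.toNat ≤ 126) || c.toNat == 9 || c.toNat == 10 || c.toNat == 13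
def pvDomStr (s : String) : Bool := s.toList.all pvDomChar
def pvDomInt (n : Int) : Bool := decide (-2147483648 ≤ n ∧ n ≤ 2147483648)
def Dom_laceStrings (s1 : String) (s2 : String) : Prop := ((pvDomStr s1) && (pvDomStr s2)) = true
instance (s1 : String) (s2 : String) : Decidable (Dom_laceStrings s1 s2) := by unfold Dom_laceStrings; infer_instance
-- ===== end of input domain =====

-- B replaces A's exception-guarded index loop over 0..max+1 by a zip over the common
-- prefix plus a single tail slice of the longer string (objective: simpler).

-- ===== PORT A =====
-- A's while loop: start runs 0,1,…,longest+1 (condition start ≤ longest+1); each step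
-- appends s1[start] then s2[start], each guarded by try/except IndexError (here: the
-- none case of list lookup; start is always ≥ 0, so Python's indexing is plain [i]?).
def laceLoopA (l1 l2 : List Char) (start : Nat) (fuel : Nat) (laced : List Char) : List Char :=
  match fuel with
  | 0 => laced
  | f + 1 =>
    let laced := match l1[start]? with | some c => laced ++ [c] | none => laced
    let laced := match l2[start]? with | some c => laced ++ [c] | none => laced
    laceLoopA l1 l2 (start + 1) f laced

def laceStrings (s1 : String) (s2 : String) : String :=
  let l1 := s1.toList
  let l2 := s2.toList
  let longest := max l1.length l2.length
  String.ofList (laceLoopA l1 l2 0 (longest + 2) [])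

-- ===== PORT B =====
def laceStrings_alt (s1 : String) (s2 : String) : String :=
  let l1 := s1.toList
  let l2 := s2.toList
  let n := min l1.length l2.length
  String.ofList (((l1.zip l2).flatMap (fun p => [p.1, p.2])) ++ l1.drop n ++ l2.drop n)

-- ===== PRECONDITION & SPEC =====
def Spec_laceStrings (s1 : String) (s2 : String) (out : String) : Prop := out = laceStrings_alt s1 s2
instance (s1 : String) (s2 : String) (out : String) : Decidable (Spec_laceStrings s1 s2 out) := by unfold Spec_laceStrings; infer_instance

-- ===== CLAIM (what is proved, stated in full; the proofs are below) =====
def Claim_equal_laceStrings : Prop := ∀ (s1 : String) (s2 : String), Dom_laceStrings s1 s2 → Spec_laceStrings s1 s2 (laceStrings s1 s2)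

-- ===== LEMMAS AND PROOFS =====

-- A's loop ignores its accumulator except to prepend it.
theorem laceLoopA_acc (l1 l2 : List Char) (fuel : Nat) : ∀ (start : Nat) (laced : List Char),
    laceLoopA l1 l2 start fuel laced = laced ++ laceLoopA l1 l2 start fuel [] := by
  induction fuel with
  | zero => intro start laced; simp [laceLoopA]
  | succ f ih =>
    intro start laced
    rw [laceLoopA, laceLoopA]
    cases l1[start]? with
    | none => cases l2[start]? with
      | none => simp only []; exact ih (start + 1) laced
      | some d => simp only []; rw [ih (start + 1) (laced ++ [d]), ih (start + 1) ([] ++ [d])]; simp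
    | some c => cases l2[start]? with
      | none => simp only []; rw [ih (start + 1) (laced ++ [c]), ih (start + 1) ([] ++ [c])]; simp
      | some d =>
        simp only []
        rw [ih (start + 1) (laced ++ [c] ++ [d]), ih (start + 1) ([] ++ [c] ++ [d])]; simp

-- Indexing from start+1 is indexing the tails from start.
theorem laceLoopA_shift (l1 l2 : List Char) (fuel : Nat) : ∀ (start : Nat) (laced : List Char),
    laceLoopA l1 l2 (start + 1) fuel laced = laceLoopA (l1.drop 1) (l2.drop 1) start fuel laced := by
  induction fuel with
  | zero => intro start laced; simp [laceLoopA]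
  | succ f ih =>
    intro start laced
    rw [laceLoopA, laceLoopA]
    have h1 : l1[start + 1]? = (l1.drop 1)[start]? := by
      rw [List.getElem?_drop]; ring_nf
    have h2 : l2[start + 1]? = (l2.drop 1)[start]? := by
      rw [List.getElem?_drop]; ring_nf
    rw [h1, h2]
    cases (l1.drop 1)[start]? <;> cases (l2.drop 1)[start]? <;> simp only [] <;> exact ih _ _

theorem laceLoopA_nil (fuel : Nat) : ∀ (start : Nat) (laced : List Char),
    laceLoopA [] [] start fuel laced = laced := by
  induction fuel with
  | zero => intro start laced; rfl
  | succ f ih => intro start laced; rw [laceLoopA]; simpa using ih (start + 1) laced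

-- With enough fuel, the shifted loop computes the zip-prefix-plus-tails form.
theorem laceLoopA_closed (fuel : Nat) : ∀ (l1 l2 : List Char),
    max l1.length l2.length ≤ fuel →
    laceLoopA l1 l2 0 fuel [] =
      ((l1.zip l2).flatMap (fun p => [p.1, p.2])) ++
        l1.drop (min l1.length l2.length) ++ l2.drop (min l1.length l2.length) := by
  induction fuel with
  | zero =>
    intro l1 l2 h
    have h1 : l1 = [] := List.eq_nil_of_length_eq_zero (by omega)
    have h2 : l2 = [] := List.eq_nil_of_length_eq_zero (by omega)
    subst h1; subst h2; simp [laceLoopA]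
  | succ f ih =>
    intro l1 l2 h
    cases l1 with
    | nil =>
      cases l2 with
      | nil => simp [laceLoopA_nil]
      | cons b bs =>
        rw [laceLoopA]
        simp only [List.getElem?_nil, List.getElem?_cons_zero]
        rw [show (0:Nat) + 1 = 0 + 1 from rfl, laceLoopA_shift, laceLoopA_acc]
        have := ih [] bs (by simp at h ⊢; omega)
        simp at this ⊢
        simpa using this
    | cons a as =>
      cases l2 with
      | nil =>
        rw [laceLoopA]
        simp only [List.getElem?_nil, List.getElem?_cons_zero]
        rw [show (0:Nat) + 1 = 0 + 1 from rfl, laceLoopA_shift, laceLoopA_acc]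
        have := ih as [] (by simp at h ⊢; omega)
        simp at this ⊢
        simpa using this
      | cons b bs =>
        rw [laceLoopA]
        simp only [List.getElem?_cons_zero]
        rw [show (0:Nat) + 1 = 0 + 1 from rfl, laceLoopA_shift, laceLoopA_acc]
        have := ih as bs (by simp at h ⊢; omega)
        simp at this ⊢
        simp [this]

-- ===== VERDICT (by name: the statement is the Claim_ definition above) =====
theorem laceStrings_spec : Claim_equal_laceStrings := by
  intro s1 s2 _
  unfold Spec_laceStrings laceStrings laceStrings_alt
  simp only []
  rw [laceLoopA_closed (max s1.toList.length s2.toList.length + 2) s1.toList s2.toList (by omega)]
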